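-- pv_equiv track=rewrite | github.com/AdelBeit/2048-Bots | getpermutations.py | nextpermutation
-- ===== SOURCE A (Python) =====
-- def nextpermutation(a,i,p):
--     if i > 0:
--         b = add1(a)
--         for o in range(len(p[0])-len(b)):
--             b.insert(0,0)
--         p.append(b)
--         nextpermutation(b,i-1,p)
--     return p
--
-- def add1(a):
--     s = ""
--     for i in a:
--         s += str(i)
--     b = "".join(['0' for i in range(len(a)-1)]) + '1'
--     c = bin(int(s,2) + int(b,2))[2:]
--     u = [int(i) for i in c]
--     return u
-- ===== SOURCE B (Python) =====
-- def nextpermutation(a, i, p):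
--     if i <= 0:
--         return p
--     n = 0
--     for d in a:
--         n = n * 2 + d
--     w = len(p[0])
--     for k in range(1, i + 1):
--         m = n + k
--         bits = []
--         while m > 0:
--             bits.append(m % 2)
--             m //= 2
--         bits.reverse()
--         p.append([0] * (w - len(bits)) + bits)
--     return p
-- ===== Notes on version B (the rewrite author's own statement) =====
-- stated objective: faster
-- what changed: A recursively re-serialises the whole bit list to a string, reparses it with int(s,2) and reformats with bin() on every step; B converts the list to an integer once and then emits each successive value k=1..i directly with an arithmetic div/mod loop, no string round-trips and no recursion.
-- outside the precondition, e.g. on nextpermutation([10], 1, [[0, 0]]): A returns [[0, 0], [1, 1]], B returns [[0, 0], [1, 0, 1, 1]]; on nextpermutation([-1], 1, [[0]]): A returns [[0], [0]], B returns [[0], [0]]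
import Mathlib
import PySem

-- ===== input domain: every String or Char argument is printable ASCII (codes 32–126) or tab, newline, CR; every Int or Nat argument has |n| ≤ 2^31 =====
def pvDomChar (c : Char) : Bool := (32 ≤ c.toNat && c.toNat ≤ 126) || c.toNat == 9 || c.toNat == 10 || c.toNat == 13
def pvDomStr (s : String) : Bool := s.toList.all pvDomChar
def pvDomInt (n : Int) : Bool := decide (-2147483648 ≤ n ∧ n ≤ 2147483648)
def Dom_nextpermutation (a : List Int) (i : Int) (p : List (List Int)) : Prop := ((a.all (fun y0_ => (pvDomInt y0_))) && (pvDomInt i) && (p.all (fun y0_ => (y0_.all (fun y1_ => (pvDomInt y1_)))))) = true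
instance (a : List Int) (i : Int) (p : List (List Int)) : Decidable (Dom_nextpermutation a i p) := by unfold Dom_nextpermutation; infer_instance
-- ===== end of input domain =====

-- B replaces A's per-step string round-trip (list -> str -> int(s,2) -> bin -> list, recursively)
-- by one list->integer conversion followed by a plain arithmetic div/mod loop per emitted row
-- (return value AND the in-place growth of p are the same; both append i rows to p).

-- ===== PORT A =====

-- hand-ported int(s, 2): exact on the nonempty '0'/'1'-digit strings that reach it under
-- Pre_nextpermutation (none elsewhere, like Python's ValueError on empty/non-binary text;
-- the general primitive PySem.Int.ofStrBase? computes the same value on these strings but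
-- its parser internals are private, which blocks the equivalence proof).
def parseBin2? (s : String) : Option Int :=
  if s.toList ≠ [] ∧ s.toList.all (fun c => c = '0' ∨ c = '1')
  then some (s.toList.foldl (fun n c => 2 * n + (if c = '1' then 1 else 0)) 0)
  else none

def add1 (a : List Int) : List Int :=
  -- s = "" ; for i in a: s += str(i)
  let s : String := a.foldl (fun s i => s ++ PySem.Int.toStr i) ""
  -- b = "".join(['0' for i in range(len(a)-1)]) + '1'
  let b : String := PySem.Str.join "" ((List.range (a.length - 1)).map (fun _ => "0")) ++ "1"
  -- c = bin(int(s,2) + int(b,2))[2:]   (int(_,2) raises outside Pre_: defaults are unreachable there)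
  let c : List Char := PySem.List.slice (PySem.Int.pyBin ((parseBin2? s).getD 0 + (parseBin2? b).getD 0)).toList (some 2) none
  -- u = [int(i) for i in c]
  c.map (fun ch => (PySem.Int.ofChars? [ch]).getD 0)

def nextpermutation (a : List Int) (i : Int) (p : List (List Int)) : List (List Int) :=
  if 0 < i then
    let b := add1 a
    -- for o in range(len(p[0]) - len(b)): b.insert(0, 0)   (p[0] raises IndexError outside Pre_)
    let b2 := (List.range (((PySem.List.pyGet? p 0).getD []).length - b.length)).foldl
                (fun acc _ => (0 : Int) :: acc) b
    nextpermutation b2 (i - 1) (p ++ [b2])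
  else p
termination_by i.toNat
decreasing_by omega

-- ===== PORT B =====

-- while m > 0: bits.append(m % 2); m //= 2
def collectBits (m : Int) (bits : List Int) : List Int :=
  if h : 0 < m then collectBits (PySem.Int.floordiv m 2) (bits ++ [PySem.Int.mod m 2]) else bits
termination_by m.toNat
decreasing_by
  have := PySem.Int.floordiv_eq_ediv_of_pos (a := m) (b := 2) (by omega)
  omega

def nextpermutation_alt (a : List Int) (i : Int) (p : List (List Int)) : List (List Int) :=
  if i ≤ 0 then p
  else
    let n := a.foldl (fun n d => n * 2 + d) 0
    let w := ((PySem.List.pyGet? p 0).getD []).length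
    (PySem.List.pyRange 1 (i + 1) 1).foldl
      (fun q k =>
        let bits := (collectBits (n + k) []).reverse
        q ++ [List.replicate (w - bits.length) 0 ++ bits]) p

-- ===== PRECONDITION & SPEC =====
-- Pre_ excludes, for i > 0, exactly the inputs where A raises: empty p (IndexError at p[0]),
-- and digit lists that are empty or not all 0/1 bits, on which int(s,2) raises ValueError —
-- except accidental returns where the concatenated digit string happens to reparse as binary
-- (e.g. a = [10] read as '10', or a = [-1] read as '-1'); those accidents are excluded too.
def Pre_nextpermutation (a : List Int) (i : Int) (p : List (List Int)) : Prop :=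
  0 < i → (a ≠ [] ∧ (∀ x ∈ a, x = 0 ∨ x = 1) ∧ p ≠ [])
instance (a : List Int) (i : Int) (p : List (List Int)) : Decidable (Pre_nextpermutation a i p) := by
  unfold Pre_nextpermutation; infer_instance

def pvWitness_nextpermutation : List Int × Int × List (List Int) := ([0, 1], 2, [[0, 1]])

def Spec_nextpermutation (a : List Int) (i : Int) (p : List (List Int)) (out : List (List Int)) : Prop := out = nextpermutation_alt a i p
instance (a : List Int) (i : Int) (p : List (List Int)) (out : List (List Int)) : Decidable (Spec_nextpermutation a i p out) := by unfold Spec_nextpermutation; infer_instance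

-- ===== CLAIM (what is proved, stated in full; the proofs are below) =====
def Claim_equal_nextpermutation : Prop := ∀ (a : List Int) (i : Int) (p : List (List Int)), Dom_nextpermutation a i p → Pre_nextpermutation a i p → Spec_nextpermutation a i p (nextpermutation a i p)

-- ===== LEMMAS AND PROOFS =====

-- the bits of n, most significant first (bitsN 0 = [])
def bitsN (n : Nat) : List Int :=
  if h : n = 0 then [] else bitsN (n / 2) ++ [((n % 2 : Nat) : Int)]
decreasing_by exact Nat.div_lt_self (Nat.pos_of_ne_zero h) one_lt_two

-- the binary value of a bit list (B's first loop)
def valZ (l : List Int) : Int := l.foldl (fun n d => n * 2 + d) 0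

-- one emitted row
def rowN (w : Nat) (v : Int) : List Int :=
  List.replicate (w - (bitsN v.toNat).length) 0 ++ bitsN v.toNat

theorem foldl_val_nonneg (l : List Int) (c : Int) (hb : ∀ x ∈ l, x = 0 ∨ x = 1) (hc : 0 ≤ c) :
    0 ≤ l.foldl (fun n d => n * 2 + d) c := by
  induction l generalizing c with
  | nil => simpa
  | cons d t ih =>
    have hd := hb d (by simp)
    simp only [List.foldl_cons]
    exact ih _ (fun x hx => hb x (List.mem_cons_of_mem _ hx)) (by omega)

theorem bitsN_ne_nil (n : Nat) (h : n ≠ 0) : bitsN n ≠ [] := by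
  rw [bitsN]; simp [h]

theorem bitsN_bits (n : Nat) : ∀ x ∈ bitsN n, x = 0 ∨ x = 1 := by
  induction n using Nat.strong_induction_on with
  | _ n ih =>
    rw [bitsN]
    split
    · simp
    · rename_i h
      intro x hx
      rcases List.mem_append.1 hx with hx | hx
      · exact ih (n / 2) (Nat.div_lt_self (Nat.pos_of_ne_zero h) one_lt_two) x hx
      · simp at hx; omega

theorem valZ_append_singleton (l : List Int) (d : Int) :
    valZ (l ++ [d]) = valZ l * 2 + d := by
  simp [valZ]

theorem foldl_val_replicate (k : Nat) :
    (List.replicate k (0 : Int)).foldl (fun n d => n * 2 + d) 0 = 0 := by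
  induction k with
  | zero => rfl
  | succ k ih => simpa [List.replicate_succ] using ih

theorem valZ_replicate_append (k : Nat) (l : List Int) :
    valZ (List.replicate k 0 ++ l) = valZ l := by
  simp [valZ, List.foldl_append, foldl_val_replicate]

theorem valZ_nonneg (l : List Int) (hb : ∀ x ∈ l, x = 0 ∨ x = 1) : 0 ≤ valZ l :=
  foldl_val_nonneg l 0 hb le_rfl

theorem valZ_bitsN (n : Nat) : valZ (bitsN n) = n := by
  induction n using Nat.strong_induction_on with
  | _ n ih =>
    rw [bitsN]
    split
    · rename_i h; simp [valZ, h]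
    · rename_i h
      rw [valZ_append_singleton, ih (n / 2) (Nat.div_lt_self (Nat.pos_of_ne_zero h) one_lt_two)]
      have h2 : (n / 2) * 2 + n % 2 = n := by omega
      push_cast
      omega

-- the string A builds from a bit list, as a char list
theorem stoList (a : List Int) (s0 : String) (hb : ∀ x ∈ a, x = 0 ∨ x = 1) :
    (a.foldl (fun s i => s ++ PySem.Int.toStr i) s0).toList
      = s0.toList ++ a.map (fun d => if d = 1 then '1' else '0') := by
  induction a generalizing s0 with
  | nil => simp
  | cons d t ih =>
    have hd := hb d (by simp)
    have ht : ∀ x ∈ t, x = 0 ∨ x = 1 := fun x hx => hb x (by simp [hx])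
    simp only [List.foldl_cons, List.map_cons]
    rw [ih _ ht, String.toList_append, PySem.Int.toList_toStr]
    rcases hd with h | h <;> subst h <;> simp <;> rfl

theorem parse_bits (a : List Int) (s : String) (ha : a ≠ []) (hb : ∀ x ∈ a, x = 0 ∨ x = 1)
    (hs : s.toList = a.map (fun d => if d = 1 then '1' else '0')) :
    parseBin2? s = some (valZ a) := by
  unfold parseBin2?
  rw [hs]
  have h1 : a.map (fun d => if d = 1 then '1' else '0') ≠ [] := by simpa using ha
  have h2 : (a.map (fun d => if d = 1 then '1' else '0')).all (fun c => c = '0' ∨ c = '1') := by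
    refine List.all_eq_true.2 (fun c hc => ?_)
    rcases List.mem_map.1 hc with ⟨d, hd, rfl⟩
    rcases hb d hd with h | h <;> simp [h]
  rw [if_pos ⟨h1, h2⟩]
  congr 1
  rw [List.foldl_map]
  rw [PySem.List.foldl_congr_mem a _ (fun n d => n * 2 + d) 0 ?_]
  · rfl
  · intro acc x hx
    rcases hb x hx with h | h <;> subst h <;> simp <;> omega

theorem parse_one (k : Nat) :
    parseBin2? (PySem.Str.join "" ((List.range k).map (fun _ => "0")) ++ "1") = some 1 := by
  have ht : (PySem.Str.join "" ((List.range k).map (fun _ => "0")) ++ "1").toList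
      = List.replicate k '0' ++ ['1'] := by
    rw [String.toList_append, PySem.Str.toList_join]
    have hm : ((List.range k).map (fun _ => "0")).map String.toList
        = (List.replicate k '0').map ([·]) := by simp [List.map_const']
    rw [hm]
    have he : ("" : String).toList = [] := rfl
    rw [he, PySem.Chars.join_nil_singletons]
    rfl
  unfold parseBin2?
  rw [ht]
  have h1 : List.replicate k '0' ++ ['1'] ≠ [] := by simp
  have h2 : (List.replicate k '0' ++ ['1']).all (fun c => c = '0' ∨ c = '1') := by
    refine List.all_eq_true.2 (fun c hc => ?_)
    rcases List.mem_append.1 hc with hc | hc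
    · simp [List.eq_of_mem_replicate hc]
    · simp at hc; simp [hc]
  rw [if_pos ⟨h1, h2⟩]
  congr 1
  rw [List.foldl_append]
  have hz : ∀ j : Nat, (List.replicate j '0').foldl
      (fun (n : Int) c => 2 * n + (if c = '1' then 1 else 0)) 0 = 0 := by
    intro j
    induction j with
    | zero => rfl
    | succ j ih => simpa [List.replicate_succ] using ih
  rw [hz]
  simp

theorem toDigits_two (n : Nat) (h : n ≠ 0) :
    Nat.toDigits 2 n = (bitsN n).map (fun d => if d = 1 then '1' else '0') := by
  induction n using Nat.strong_induction_on with
  | _ n ih =>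
    by_cases h1 : n = 1
    · subst h1
      have hone : Nat.toDigits 2 1 = ['1'] := by decide
      rw [hone, bitsN]
      rw [bitsN]
      simp
    · have h2 : 2 ≤ n := by omega
      rw [Nat.toDigits_of_base_le (by norm_num) h2]
      rw [bitsN]
      rw [dif_neg h]
      rw [List.map_append]
      have hd2 : n / 2 ≠ 0 := by omega
      rw [ih (n / 2) (Nat.div_lt_self (by omega) one_lt_two) hd2]
      have hm : n % 2 = 0 ∨ n % 2 = 1 := by omega
      rcases hm with hm | hm <;> simp [hm, Nat.digitChar]

theorem add1_eq (a : List Int) (ha : a ≠ []) (hb : ∀ x ∈ a, x = 0 ∨ x = 1) :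
    add1 a = bitsN (valZ a + 1).toNat := by
  have hv : 0 ≤ valZ a := valZ_nonneg a hb
  have hs := parse_bits a (a.foldl (fun s i => s ++ PySem.Int.toStr i) "") ha hb
    (by rw [stoList a "" hb]; rfl)
  unfold add1
  simp only [hs, parse_one, Option.getD_some]
  rw [PySem.Int.toList_pyBin]
  unfold PySem.Int.toBinChars0b
  rw [if_neg (by omega)]
  rw [PySem.List.slice_from ('0' :: 'b' :: Nat.toDigits 2 (valZ a + 1).toNat) (by norm_num : (0:Int) ≤ 2)]
  show List.map _ (Nat.toDigits 2 (valZ a + 1).toNat) = _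
  rw [toDigits_two _ (by omega : (valZ a + 1).toNat ≠ 0)]
  rw [List.map_map]
  have hid : ∀ x ∈ bitsN (valZ a + 1).toNat,
      ((fun ch => (PySem.Int.ofChars? [ch]).getD 0) ∘ fun d => if d = 1 then '1' else '0') x = x := by
    intro x hx
    rcases bitsN_bits _ x hx with h | h <;> subst h <;> decide
  calc ((bitsN (valZ a + 1).toNat).map ((fun ch => (PySem.Int.ofChars? [ch]).getD 0) ∘ fun d => if d = 1 then '1' else '0'))
      = (bitsN (valZ a + 1).toNat).map id := List.map_congr_left hid
    _ = bitsN (valZ a + 1).toNat := List.map_id _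

theorem pad_eq (k : Nat) (b : List Int) :
    (List.range k).foldl (fun acc _ => (0 : Int) :: acc) b = List.replicate k 0 ++ b := by
  induction k with
  | zero => rfl
  | succ k ih =>
    rw [List.range_succ, List.foldl_append, ih]
    simp [List.replicate_succ]

theorem collectBits_eq (m : Int) (bits : List Int) :
    collectBits m bits = bits ++ (bitsN m.toNat).reverse := by
  induction hn : m.toNat using Nat.strong_induction_on generalizing m bits with
  | _ n ih =>
    rw [collectBits]
    split
    · rename_i hpos
      rw [PySem.Int.floordiv_eq_ediv_of_pos (by omega), PySem.Int.mod_eq_emod_of_pos (by omega)]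
      rw [ih (m / 2).toNat (by omega) (m / 2) _ rfl]
      rw [List.append_assoc]
      congr 1
      conv_rhs => rw [bitsN]
      rw [dif_neg (by omega)]
      rw [List.reverse_append]
      simp only [List.reverse_singleton, List.singleton_append]
      have e1 : (m / 2).toNat = m.toNat / 2 := by omega
      have e2 : m % 2 = ((m.toNat % 2 : Nat) : Int) := by omega
      rw [e1, e2, hn]
    · rename_i hneg
      have h0 : n = 0 := by omega
      rw [h0, bitsN]
      simp

theorem A_main (m : Nat) (a : List Int) (p : List (List Int)) (w : Nat)
    (ha : a ≠ []) (hb : ∀ x ∈ a, x = 0 ∨ x = 1) (hp : p ≠ [])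
    (hw : w = ((PySem.List.pyGet? p 0).getD []).length) :
    nextpermutation a (m : Int) p
      = p ++ (List.range m).map (fun j : Nat => rowN w (valZ a + (j : Int) + 1)) := by
  induction m generalizing a p with
  | zero =>
    rw [nextpermutation]
    simp
  | succ m ih =>
    have hv : 0 ≤ valZ a := valZ_nonneg a hb
    have ht0 : (valZ a + 1).toNat ≠ 0 := by omega
    rw [nextpermutation, if_pos (by push_cast; omega : (0:Int) < ((m+1 : Nat) : Int))]
    simp only [add1_eq a ha hb, pad_eq, ← hw]
    have hrow : List.replicate (w - (bitsN (valZ a + 1).toNat).length) 0 ++ bitsN (valZ a + 1).toNat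
        = rowN w (valZ a + 1) := rfl
    rw [hrow]
    have harow : rowN w (valZ a + 1) ≠ [] := by
      have := bitsN_ne_nil _ ht0
      simp [rowN, this]
    have hbrow : ∀ x ∈ rowN w (valZ a + 1), x = 0 ∨ x = 1 := by
      intro x hx
      rcases List.mem_append.1 hx with hx | hx
      · exact Or.inl (List.eq_of_mem_replicate hx)
      · exact bitsN_bits _ x hx
    have hwrow : w = ((PySem.List.pyGet? (p ++ [rowN w (valZ a + 1)]) 0).getD []).length := by
      cases p with
      | nil => exact absurd rfl hp
      | cons x xs =>
        rw [List.cons_append, PySem.List.pyGet?_zero_cons]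
        rw [hw, PySem.List.pyGet?_zero_cons]
    have hstep : ((m + 1 : Nat) : Int) - 1 = ((m : Nat) : Int) := by push_cast; ring
    rw [hstep, ih _ _ harow hbrow (by simp) hwrow]
    have hvrow : valZ (rowN w (valZ a + 1)) = valZ a + 1 := by
      rw [rowN, valZ_replicate_append, valZ_bitsN]
      omega
    simp only [hvrow]
    rw [List.range_succ_eq_map, List.map_cons, List.map_map]
    have hf0 : rowN w (valZ a + ((0 : Nat) : Int) + 1) = rowN w (valZ a + 1) := by norm_num
    have hfs : ((fun j : Nat => rowN w (valZ a + (j : Int) + 1)) ∘ Nat.succ)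
        = fun j : Nat => rowN w (valZ a + 1 + (j : Int) + 1) := by
      funext j
      simp only [Function.comp]
      congr 1
      push_cast
      ring
    rw [hf0, hfs]
    simp [List.append_assoc]

theorem B_loop (m : Nat) (q : List (List Int)) (n : Int) (w : Nat) (_hn : 0 ≤ n) :
    (PySem.List.pyRange 1 ((m : Int) + 1) 1).foldl
      (fun q k => q ++ [List.replicate (w - ((collectBits (n + k) []).reverse).length) 0
                         ++ (collectBits (n + k) []).reverse]) q
      = q ++ (List.range m).map (fun j : Nat => rowN w (n + (j : Int) + 1)) := by
  induction m generalizing q with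
  | zero =>
    rw [show ((0:Nat):Int) + 1 = 1 by norm_num, PySem.List.pyRange_one_eq_nil le_rfl]
    simp
  | succ m ih =>
    rw [show ((m+1:Nat):Int) + 1 = (((m:Nat):Int) + 1) + 1 by norm_num]
    rw [PySem.List.pyRange_one_succ_right (by omega)]
    rw [List.foldl_append, ih]
    simp only [List.foldl_cons, List.foldl_nil]
    rw [collectBits_eq, List.nil_append, List.reverse_reverse]
    have hrow : List.replicate (w - (bitsN (n + (((m:Nat):Int) + 1)).toNat).length) 0
          ++ bitsN (n + (((m:Nat):Int) + 1)).toNat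
        = rowN w (n + ((m:Nat):Int) + 1) := by
      rw [rowN, ← add_assoc]
    rw [hrow, List.range_succ, List.map_append]
    simp [List.append_assoc]

-- ===== VERDICT (by name: the statement is the Claim_ definition above) =====
theorem nextpermutation_spec : Claim_equal_nextpermutation := by
  intro a i p _ hpre
  unfold Spec_nextpermutation
  by_cases hi : 0 < i
  · obtain ⟨ha, hb, hp⟩ := hpre hi
    obtain ⟨m, rfl⟩ : ∃ m : Nat, i = (m : Int) := ⟨i.toNat, by omega⟩
    rw [A_main m a p _ ha hb hp rfl]
    unfold nextpermutation_alt
    rw [if_neg (by omega)]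
    simp only []
    rw [B_loop m p (a.foldl (fun n d => n * 2 + d) 0) _ (valZ_nonneg a hb)]
    rfl
  · rw [nextpermutation, if_neg hi]
    unfold nextpermutation_alt
    rw [if_pos (by omega)]
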